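-- pv_equiv track=rewrite | github.com/TheodoreNguyen/Fun | project_euler/problem1.py | findMultiplesSumBelowBound
-- ===== SOURCE A (Python) =====
-- def findMultiplesSumBelowBound(natList, bound):
--     '''
--     natList     list of nonnegative integer. if an element is greater than the bound arg, then its ignored essentially
--     bound       integer that is nonnegative
--     '''
--
--     #create a list that we will simply sum in the end, which is empty in the beginning
--     counterList = []
--
--     #iterate through each item in the input list
--     for num in natList:
--         #skip the trivial case where the natural number is 0 since adding this to our counterList is pointless will not add anything to our sum
--         if num == 0:
--             continue
--         #iterate through each possible multiplicand: obviously bound-1 is the maximum multiplicand for the smallest multiplier - which is 1 (0 is skipped)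
--         for multiplicand in range(1, bound):
--             #check if the product is less than the bound
--             if ((multiplicand * num) < bound):
--                 #if the product is less, then append the product (the multiple) to our counterList
--                 counterList.append(multiplicand * num)
--             #if the product is greater than the bound
--             else:
--                 #then every product after this for this num will also be greater than the bound, so skip on to the next num instead of checking each multiplicand
--                 break
--
--     return sum(counterList)
-- ===== SOURCE B (Python) =====
-- def findMultiplesSumBelowBound(natList, bound):
--     # Sum of the positive multiples of each num that are below bound,
--     # via the arithmetic-series formula: num * (1 + 2 + ... + k) with
--     # k the largest multiplier such that k*num < bound.
--     total = 0
--     for num in natList: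
--         if num > 0 and bound > 1:
--             k = (bound - 1) // num
--             total += num * k * (k + 1) // 2
--     return total
-- ===== Notes on version B (the rewrite author's own statement) =====
-- stated objective: simpler
-- what changed: Replaces the inner multiplicand loop (enumerating every multiple below the bound) with the closed-form arithmetic-series formula num*k*(k+1)//2 with k=(bound-1)//num, one O(1) step per list element; Pre_ excludes lists containing a negative element when bound > 1, i.e. inputs outside the documented natural domain ('list of nonnegative integer') on which A still sums the negative element's products while B ignores it.
-- outside the precondition, e.g. on findMultiplesSumBelowBound([-2], 5): A returns -20, B returns 0
import Mathlib
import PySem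

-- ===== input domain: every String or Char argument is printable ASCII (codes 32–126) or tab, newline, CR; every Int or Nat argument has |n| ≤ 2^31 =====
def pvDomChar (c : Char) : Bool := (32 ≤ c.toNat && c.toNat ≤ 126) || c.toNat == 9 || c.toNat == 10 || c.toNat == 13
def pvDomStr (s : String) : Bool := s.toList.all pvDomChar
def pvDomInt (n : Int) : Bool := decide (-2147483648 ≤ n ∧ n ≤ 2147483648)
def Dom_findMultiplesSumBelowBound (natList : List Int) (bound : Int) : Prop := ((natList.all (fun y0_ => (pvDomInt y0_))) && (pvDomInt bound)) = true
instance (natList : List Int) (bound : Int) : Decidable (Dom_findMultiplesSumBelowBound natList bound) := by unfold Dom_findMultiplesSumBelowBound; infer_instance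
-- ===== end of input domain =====

-- B replaces A's inner multiple-enumeration loop with the closed-form arithmetic-series
-- formula num*k*(k+1)//2 (k = (bound-1)//num), one constant-time step per list element.

-- ===== PORT A =====
-- inner 'for multiplicand in range(1, bound): … else break' loop of A
def pvInnerA (bound num : Int) : List Int → List Int → List Int
  | [], acc => acc
  | m :: rest, acc =>
      if m * num < bound then pvInnerA bound num rest (acc ++ [m * num]) else acc

def findMultiplesSumBelowBound (natList : List Int) (bound : Int) : Int :=
  (natList.foldl
    (fun counterList num =>
      if num = 0 then counterList
      else pvInnerA bound num (PySem.List.pyRange 1 bound 1) counterList)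
    []).sum

-- ===== PORT B =====
-- body of B's single loop: closed-form contribution of one element
def pvStepB (bound total num : Int) : Int :=
  if 0 < num ∧ 1 < bound then
    let k := PySem.Int.floordiv (bound - 1) num
    total + PySem.Int.floordiv (num * k * (k + 1)) 2
  else total

def findMultiplesSumBelowBound_alt (natList : List Int) (bound : Int) : Int :=
  natList.foldl (fun total num => pvStepB bound total num) 0

-- ===== PRECONDITION & SPEC =====
-- Pre_ restricts to the function's documented natural domain ('natList: list of nonnegative
-- integer'): it excludes lists containing a negative element when bound > 1 — the only inputs
-- where A, fed outside its documented domain, still returns a value (it sums every product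
-- m*num for m in 1..bound-1) while B's natural algorithm ignores the negative element.
def Pre_findMultiplesSumBelowBound (natList : List Int) (bound : Int) : Prop :=
  (∀ x ∈ natList, 0 ≤ x) ∨ bound ≤ 1
instance (natList : List Int) (bound : Int) : Decidable (Pre_findMultiplesSumBelowBound natList bound) := by unfold Pre_findMultiplesSumBelowBound; infer_instance

def pvWitness_findMultiplesSumBelowBound : List Int × Int := ([3, 5, 0, 7], 10)

def Spec_findMultiplesSumBelowBound (natList : List Int) (bound : Int) (out : Int) : Prop := out = findMultiplesSumBelowBound_alt natList bound
instance (natList : List Int) (bound : Int) (out : Int) : Decidable (Spec_findMultiplesSumBelowBound natList bound out) := by unfold Spec_findMultiplesSumBelowBound; infer_instance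

-- ===== CLAIM =====
def Claim_equal_findMultiplesSumBelowBound : Prop := ∀ (natList : List Int) (bound : Int), Dom_findMultiplesSumBelowBound natList bound → Pre_findMultiplesSumBelowBound natList bound → Spec_findMultiplesSumBelowBound natList bound (findMultiplesSumBelowBound natList bound)

-- ===== LEMMAS AND PROOFS =====

theorem pvInnerA_append (bound num : Int) :
    ∀ (ms acc : List Int), pvInnerA bound num ms acc = acc ++ pvInnerA bound num ms [] := by
  intro ms
  induction ms with
  | nil => intro acc; simp [pvInnerA]
  | cons m rest ih =>
      intro acc
      simp only [pvInnerA]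
      by_cases h : m * num < bound
      · rw [if_pos h, if_pos h, ih (acc ++ [m * num]), ih ([] ++ [m * num])]
        simp
      · rw [if_neg h, if_neg h]; simp

theorem pvInnerA_eq_takeWhile (bound num : Int) :
    ∀ ms : List Int, pvInnerA bound num ms []
      = (ms.takeWhile (fun m => decide (m * num < bound))).map (fun m => m * num) := by
  intro ms
  induction ms with
  | nil => simp [pvInnerA]
  | cons m rest ih =>
      simp only [pvInnerA, List.takeWhile]
      by_cases h : m * num < bound
      · rw [if_pos h, pvInnerA_append bound num rest ([] ++ [m * num]), ih]
        simp [h]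
      · simp [h]

theorem takeWhile_pyRange_lt (p : Int → Bool) (t : Int) :
    ∀ (n : Nat) (a b : Int), (b - a).toNat ≤ n →
      (∀ m, a ≤ m → m < b → (p m = true ↔ m < t)) →
      (PySem.List.pyRange a b 1).takeWhile p = PySem.List.pyRange a (min b t) 1 := by
  intro n
  induction n with
  | zero =>
      intro a b hn _
      have hba : b ≤ a := by omega
      rw [PySem.List.pyRange_one_eq_nil hba,
        PySem.List.pyRange_one_eq_nil (le_trans (min_le_left b t) hba)]
      simp
  | succ n ih =>
      intro a b hn hp
      by_cases hab : a < b
      · rw [PySem.List.pyRange_one_cons hab]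
        simp only [List.takeWhile]
        by_cases hat : a < t
        · rw [(hp a le_rfl hab).mpr hat]
          simp only []
          rw [ih (a + 1) b (by omega) (fun m hm hmb => hp m (by omega) hmb)]
          exact (PySem.List.pyRange_one_cons (lt_min hab hat)).symm
        · have hfa : p a = false := by
            cases hpa : p a
            · rfl
            · exact absurd ((hp a le_rfl hab).mp hpa) hat
          rw [hfa]
          simp only []
          rw [PySem.List.pyRange_one_eq_nil (le_trans (min_le_right b t) (by omega))]
      · rw [PySem.List.pyRange_one_eq_nil (by omega),
          PySem.List.pyRange_one_eq_nil (le_trans (min_le_left b t) (by omega))]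
        simp

theorem sum_pyRange_gauss : ∀ (n : Nat), 2 * (PySem.List.pyRange 1 ((n : Int) + 1) 1).sum = (n : Int) * ((n : Int) + 1) := by
  intro n
  induction n with
  | zero => rw [PySem.List.pyRange_one_eq_nil (by omega)]; simp
  | succ n ih =>
      have h : (((n + 1 : Nat) : Int)) + 1 = ((n : Int) + 1) + 1 := by push_cast; ring
      rw [h, PySem.List.pyRange_one_succ_right (by omega), List.sum_append]
      simp only [List.sum_cons, List.sum_nil]
      push_cast
      linear_combination ih

theorem sum_pyRange_two (t : Int) (ht : 1 ≤ t) :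
    2 * (PySem.List.pyRange 1 t 1).sum = (t - 1) * t := by
  have h : t = ((t - 1).toNat : Int) + 1 := by omega
  rw [h, sum_pyRange_gauss]
  ring

theorem sum_map_mul (l : List Int) (b : Int) : (l.map (fun x => x * b)).sum = l.sum * b := by
  induction l with
  | nil => simp
  | cons x xs ih => simp [ih]; ring

-- per-element value of A's inner loop = B's closed-form contribution (for positive num)
theorem inner_contrib (bound num : Int) (hpos : 0 < num) :
    (pvInnerA bound num (PySem.List.pyRange 1 bound 1) []).sum = pvStepB bound 0 num := by
  rw [pvInnerA_eq_takeWhile]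
  by_cases hb : 1 < bound
  · simp only [pvStepB]
    set k := PySem.Int.floordiv (bound - 1) num with hk
    have hbr : ∀ q : Int, k < q ↔ bound - 1 < q * num := fun q =>
      PySem.Int.floordiv_lt_iff_lt_mul hpos
    have hk0 : 0 ≤ k := by
      by_contra hc
      have := (hbr 0).mp (by omega)
      omega
    have hcond : ∀ m, (decide (m * num < bound) = true ↔ m < k + 1) := by
      intro m
      simp only [decide_eq_true_iff]
      constructor
      · intro h; by_contra hc
        have : bound - 1 < m * num := (hbr m).mp (by omega)
        omega
      · intro h
        have h2 : ¬ (k < m) := by omega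
        have := (hbr m).not.mp h2
        omega
    rw [takeWhile_pyRange_lt _ (k + 1) (bound - 1).toNat 1 bound (by omega)
      (fun m _ _ => hcond m)]
    have hkb : k + 1 ≤ bound := by
      have : k < bound := (hbr bound).mpr (by nlinarith)
      omega
    rw [min_eq_right hkb, sum_map_mul]
    have hg := sum_pyRange_two (k + 1) (by omega)
    have heq : num * k * (k + 1) = 2 * ((PySem.List.pyRange 1 (k + 1) 1).sum * num) := by
      nlinarith [hg]
    rw [heq, PySem.Int.floordiv_eq_ediv_of_pos (by omega : (0:Int) < 2),
      Int.mul_ediv_cancel_left _ (by omega : (2:Int) ≠ 0)]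
    rw [if_pos (show 0 < num ∧ 1 < bound from ⟨hpos, hb⟩)]
    ring
  · rw [PySem.List.pyRange_one_eq_nil (by omega)]
    simp [pvStepB, hb]

theorem fold_eq (bound : Int) :
    ∀ (l : List Int) (acc : List Int), (∀ x ∈ l, 0 ≤ x) →
      (l.foldl
        (fun counterList num =>
          if num = 0 then counterList
          else pvInnerA bound num (PySem.List.pyRange 1 bound 1) counterList)
        acc).sum
      = l.foldl (fun total num => pvStepB bound total num) acc.sum := by
  intro l
  induction l with
  | nil => intro acc _; simp
  | cons num rest ih =>
      intro acc hpre
      have hnum : 0 ≤ num := hpre num (by simp)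
      have hrest : ∀ x ∈ rest, 0 ≤ x := fun x hx => hpre x (by simp [hx])
      simp only [List.foldl_cons]
      by_cases hz : num = 0
      · subst hz
        rw [if_pos rfl, ih acc hrest]
        have : pvStepB bound acc.sum 0 = acc.sum := by simp [pvStepB]
        rw [this]
      · rw [if_neg hz, ih _ hrest, pvInnerA_append, List.sum_append,
          inner_contrib bound num (by omega)]
        congr 1
        simp only [pvStepB]
        split_ifs <;> ring

theorem fold_trivial (bound : Int) (hb : bound ≤ 1) :
    ∀ (l : List Int) (acc : List Int),
      (l.foldl
        (fun counterList num =>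
          if num = 0 then counterList
          else pvInnerA bound num (PySem.List.pyRange 1 bound 1) counterList)
        acc) = acc := by
  intro l
  induction l with
  | nil => intro acc; rfl
  | cons num rest ih =>
      intro acc
      simp only [List.foldl_cons]
      have h : pvInnerA bound num (PySem.List.pyRange 1 bound 1) acc = acc := by
        rw [PySem.List.pyRange_one_eq_nil hb]; rfl
      split_ifs
      · exact ih acc
      · rw [h]; exact ih acc

theorem foldB_trivial (bound : Int) (hb : bound ≤ 1) :
    ∀ (l : List Int) (t : Int), l.foldl (fun total num => pvStepB bound total num) t = t := by
  intro l
  induction l with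
  | nil => intro t; rfl
  | cons num rest ih =>
      intro t
      simp only [List.foldl_cons, pvStepB]
      rw [if_neg (by omega : ¬ (0 < num ∧ 1 < bound))]
      exact ih t

-- ===== VERDICT (by name: the statement is the Claim_ definition above) =====
theorem findMultiplesSumBelowBound_spec : Claim_equal_findMultiplesSumBelowBound := by
  intro natList bound _ hpre
  unfold Spec_findMultiplesSumBelowBound findMultiplesSumBelowBound findMultiplesSumBelowBound_alt
  rcases hpre with hnn | hb
  · have := fold_eq bound natList [] hnn
    simpa using this
  · rw [fold_trivial bound hb, foldB_trivial bound hb]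
    rfl
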